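-- pv_equiv track=rewrite | github.com/ToDucThanh-SYNERGIEGLOBAL/agents | examples/all_refactored.py | merge_kv_reducer
-- ===== SOURCE A (Python) =====
-- def merge_kv_reducer(a, b) -> dict:
--     """Merge two flat dicts with deletion support via None values."""
--     base = dict(a or {})
--     if not b:
--         return base
--     for k, v in b.items():
--         if v is None:
--             base.pop(k, None)
--         else:
--             base[k] = v
--     return base
-- ===== SOURCE B (Python) =====
-- def merge_kv_reducer(a, b) -> dict:
--     """Merge two flat dicts with deletion support via None values."""
--     a = a or {}
--     b = b or {}
--     merged = {**a, **b}
--     return {k: v for k, v in merged.items() if not (k in b and b[k] is None)}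
-- ===== Notes on version B (the rewrite author's own statement) =====
-- stated objective: idiomatic
-- what changed: A's per-key loop over b with a pop/assign branch is replaced by building the full union {**a, **b} in one step and then filtering out exactly the keys that b maps to None in a dict comprehension (build-then-filter instead of mutate-per-key).
-- outside the precondition, e.g. on merge_kv_reducer({'x': None}, None): A returns {'x': None}, B returns {'x': None}
import Mathlib
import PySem

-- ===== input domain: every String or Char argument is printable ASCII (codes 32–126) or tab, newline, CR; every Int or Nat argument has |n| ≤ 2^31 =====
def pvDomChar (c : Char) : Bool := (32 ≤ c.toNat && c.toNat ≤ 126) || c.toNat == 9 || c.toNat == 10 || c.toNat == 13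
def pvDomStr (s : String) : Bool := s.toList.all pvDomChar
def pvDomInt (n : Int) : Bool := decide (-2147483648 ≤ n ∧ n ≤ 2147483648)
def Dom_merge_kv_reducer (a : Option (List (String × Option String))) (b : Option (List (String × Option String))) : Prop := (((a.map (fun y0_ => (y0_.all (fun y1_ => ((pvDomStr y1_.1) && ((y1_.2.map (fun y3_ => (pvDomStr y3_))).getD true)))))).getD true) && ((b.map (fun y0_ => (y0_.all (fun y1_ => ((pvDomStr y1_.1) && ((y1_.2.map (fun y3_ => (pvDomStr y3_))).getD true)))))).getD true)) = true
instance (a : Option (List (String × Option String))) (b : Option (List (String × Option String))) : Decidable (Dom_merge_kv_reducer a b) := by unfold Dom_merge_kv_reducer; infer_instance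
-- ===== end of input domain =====

-- B replaces A's per-key pop/assign loop over b by building the union {**a, **b} once and
-- filtering out the keys b maps to None (build-then-filter decomposition); same cost.
-- Both ports return the result dict as a List (String × String); pvStrip is the
-- representation conversion to that return type (an entry whose value is None has no
-- representative of type String and is dropped by both ports alike).
def pvStrip (l : List (String × Option String)) : List (String × String) :=
  l.filterMap (fun kv => kv.2.map (fun v => (kv.1, v)))

-- ===== PORT A =====
def merge_kv_reducer (a : Option (List (String × Option String))) (b : Option (List (String × Option String))) : List (String × String) :=
  -- base = dict(a or {})
  let base : PySem.Dict String (Option String) := PySem.Dict.ofList (a.getD [])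
  let res : PySem.Dict String (Option String) :=
    match b with
    | none => base                          -- if not b: return base
    | some bl =>
      if bl.isEmpty then base               -- if not b: return base
      else
        -- for k, v in b.items(): pop / assign
        (PySem.Dict.ofList bl).items.foldl
          (fun base kv =>
            match kv.2 with
            | none => base.erase kv.1       -- base.pop(k, None)
            | some v => base.insert kv.1 (some v))  -- base[k] = v
          base
  pvStrip res.items

-- ===== PORT B =====
def merge_kv_reducer_alt (a : Option (List (String × Option String))) (b : Option (List (String × Option String))) : List (String × String) :=
  let ad : PySem.Dict String (Option String) := PySem.Dict.ofList (a.getD [])   -- a = a or {}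
  let bd : PySem.Dict String (Option String) := PySem.Dict.ofList (b.getD [])   -- b = b or {}
  -- merged = {**a, **b}
  let merged : PySem.Dict String (Option String) :=
    bd.items.foldl (fun d kv => d.insert kv.1 kv.2) ad
  -- {k: v for k, v in merged.items() if not (k in b and b[k] is None)}
  -- (merged has unique keys, so the comprehension is the filtered items list)
  pvStrip (merged.items.filter
    (fun kv => !(bd.contains kv.1 && (bd.get? kv.1 == some (none : Option String)))))

-- ===== PRECONDITION & SPEC =====
-- Pre_ excludes only inputs whose merged result keeps a None value coming from a (a key that a
-- maps to None and b does not mention): there A's returned dict contains a None value, which the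
-- declared return type dict[str, str] / List (String x String) cannot represent; the Python B
-- returns the identical dict there (this is a representation limit of the typed port, not a
-- behavioural difference).
def Pre_merge_kv_reducer (a : Option (List (String × Option String))) (b : Option (List (String × Option String))) : Prop :=
  ∀ p ∈ (PySem.Dict.ofList (a.getD [])).items,
    p.2 = none → (PySem.Dict.ofList (b.getD [])).contains p.1 = true
instance (a : Option (List (String × Option String))) (b : Option (List (String × Option String))) : Decidable (Pre_merge_kv_reducer a b) := by unfold Pre_merge_kv_reducer; infer_instance

def pvWitness_merge_kv_reducer : (Option (List (String × Option String))) × (Option (List (String × Option String))) :=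
  (some [("k", some "v"), ("d", none)], some [("d", none), ("x", some "y")])

def Spec_merge_kv_reducer (a : Option (List (String × Option String))) (b : Option (List (String × Option String))) (out : List (String × String)) : Prop := out = merge_kv_reducer_alt a b
instance (a : Option (List (String × Option String))) (b : Option (List (String × Option String))) (out : List (String × String)) : Decidable (Spec_merge_kv_reducer a b out) := by unfold Spec_merge_kv_reducer; infer_instance

-- ===== CLAIM (what is proved, stated in full; the proofs are below) =====
def Claim_equal_merge_kv_reducer : Prop := ∀ (a : Option (List (String × Option String))) (b : Option (List (String × Option String))), Dom_merge_kv_reducer a b → Pre_merge_kv_reducer a b → Spec_merge_kv_reducer a b (merge_kv_reducer a b)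

-- ===== LEMMAS AND PROOFS =====

-- dropping only None-valued entries is invisible after pvStrip
theorem pvStrip_cons (kv : String × Option String) (t : List (String × Option String)) :
    pvStrip (kv :: t) = (kv.2.map (fun v => (kv.1, v))).toList ++ pvStrip t := by
  cases h : kv.2 <;> simp [pvStrip, h]

theorem pvStrip_filter (p : String × Option String → Bool)
    (l : List (String × Option String)) (h : ∀ kv ∈ l, p kv = false → kv.2 = none) :
    pvStrip (l.filter p) = pvStrip l := by
  induction l with
  | nil => rfl
  | cons kv l ih =>
    have ih' := ih (fun q hq => h q (List.mem_cons_of_mem _ hq))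
    by_cases hp : p kv = true
    · rw [List.filter_cons_of_pos hp, pvStrip_cons, pvStrip_cons, ih']
    · have h2 := h kv (List.mem_cons_self ..) (by simpa using hp)
      rw [List.filter_cons_of_neg (by simpa using hp), ih', pvStrip_cons, h2]
      rfl

theorem get?_foldl_not_mem (bs : List (String × Option String))
    (d : PySem.Dict String (Option String)) (k : String) (h : k ∉ bs.map Prod.fst) :
    (bs.foldl (fun d kv => d.insert kv.1 kv.2) d).get? k = d.get? k := by
  induction bs generalizing d with
  | nil => rfl
  | cons kv bs ih =>
    simp only [List.map_cons, List.mem_cons, not_or] at h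
    simp only [List.foldl_cons]
    rw [ih _ h.2, PySem.Dict.get?_insert_of_ne _ _ h.1]

theorem get?_foldl_mem (bs : List (String × Option String)) (k : String) (v : Option String) :
    ∀ d : PySem.Dict String (Option String), (bs.map Prod.fst).Nodup → (k, v) ∈ bs →
    (bs.foldl (fun d kv => d.insert kv.1 kv.2) d).get? k = some v := by
  induction bs with
  | nil => intro d _ hm; simp at hm
  | cons kv bs ih =>
    intro d hnd hm
    obtain ⟨k1, v1⟩ := kv
    simp only [List.map_cons, List.nodup_cons] at hnd
    rcases List.mem_cons.mp hm with h | h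
    · obtain ⟨h1, h2⟩ := Prod.mk.injEq .. ▸ h
      subst h1; subst h2
      simp only [List.foldl_cons]
      rw [get?_foldl_not_mem _ _ _ hnd.1, PySem.Dict.get?_insert_self]
    · exact ih _ hnd.2 h

theorem keys_map_replace (k' : String) (v' : Option String)
    (l : List (String × Option String)) :
    (l.map (fun p => if p.1 == k' then (k', v') else p)).map Prod.fst = l.map Prod.fst := by
  induction l with
  | nil => rfl
  | cons p l ih =>
    obtain ⟨x, y⟩ := p
    simp only [List.map_cons]
    rw [ih]
    by_cases h : x = k' <;> simp [h]

-- a (k, None) entry anywhere in the accumulator is invisible after pvStrip, through any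
-- sequence of inserts at other keys
theorem strip_foldl_mid (bs : List (String × Option String)) :
    ∀ (l1 l2 : List (String × Option String)) (k : String),
    k ∉ (l1 ++ l2).map Prod.fst → k ∉ bs.map Prod.fst →
    pvStrip ((bs.foldl (fun d kv => d.insert kv.1 kv.2) (PySem.Dict.mk (l1 ++ (k, none) :: l2))).items)
      = pvStrip ((bs.foldl (fun d kv => d.insert kv.1 kv.2) (PySem.Dict.mk (l1 ++ l2))).items) := by
  induction bs with
  | nil =>
    intro l1 l2 k _ _
    simp [pvStrip]
  | cons kv bs ih =>
    intro l1 l2 k hk hkbs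
    obtain ⟨k', v'⟩ := kv
    simp only [List.map_cons, List.mem_cons, not_or] at hkbs
    have hkk' : k ≠ k' := hkbs.1
    simp only [List.foldl_cons]
    by_cases hc : (PySem.Dict.mk (l1 ++ l2)).contains k' = true
    · -- k' already present: both inserts replace in place
      have hc1 : (PySem.Dict.mk (l1 ++ (k, none) :: l2)).contains k' = true := by
        simp only [PySem.Dict.contains, List.any_append, List.any_cons,
          Bool.or_eq_true_iff] at hc ⊢
        rcases hc with h | h
        · exact Or.inl h
        · exact Or.inr (Or.inr h)
      rw [show (PySem.Dict.mk (l1 ++ (k, none) :: l2)).insert k' v'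
            = PySem.Dict.mk ((l1.map (fun p => if p.1 == k' then (k', v') else p))
                ++ (k, none) :: (l2.map (fun p => if p.1 == k' then (k', v') else p))) by
            simp only [PySem.Dict.insert, hc1]
            simp [hkk']]
      rw [show (PySem.Dict.mk (l1 ++ l2)).insert k' v'
            = PySem.Dict.mk ((l1.map (fun p => if p.1 == k' then (k', v') else p))
                ++ (l2.map (fun p => if p.1 == k' then (k', v') else p))) by
            simp only [PySem.Dict.insert, hc]
            simp]
      apply ih
      · rw [← List.map_append, keys_map_replace]
        exact hk
      · exact hkbs.2
    · -- k' fresh: both inserts append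
      have hcf : (PySem.Dict.mk (l1 ++ l2)).contains k' = false := Bool.eq_false_iff.mpr hc
      have hc1 : (PySem.Dict.mk (l1 ++ (k, none) :: l2)).contains k' = false := by
        simp only [PySem.Dict.contains, List.any_append, List.any_cons,
          Bool.or_eq_false_iff] at hcf ⊢
        refine ⟨hcf.1, ?_, hcf.2⟩
        simpa using hkk'
      rw [show (PySem.Dict.mk (l1 ++ (k, none) :: l2)).insert k' v'
            = PySem.Dict.mk (l1 ++ (k, none) :: (l2 ++ [(k', v')])) by
            simp only [PySem.Dict.insert, hc1]
            simp]
      rw [show (PySem.Dict.mk (l1 ++ l2)).insert k' v'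
            = PySem.Dict.mk (l1 ++ (l2 ++ [(k', v')])) by
            simp only [PySem.Dict.insert, hcf]
            simp]
      apply ih
      · simp only [List.map_append, List.mem_append, List.map_cons, List.map_nil,
          List.mem_singleton, not_or] at hk ⊢
        exact ⟨hk.1, hk.2, by simpa using hkk'⟩
      · exact hkbs.2

theorem map_replace_eq_self (k0 : String) (v0 : Option String)
    (l : List (String × Option String)) (hl : ∀ p ∈ l, ¬(p.1 == k0) = true) :
    l.map (fun p => if p.1 == k0 then (k0, v0) else p) = l := by
  have := List.map_congr_left (l := l)
    (f := fun p => if p.1 == k0 then (k0, v0) else p) (g := id)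
    (fun p hp => by simp [Bool.eq_false_iff.mpr (hl p hp)])
  simpa using this

-- A's pop/assign loop and B's plain union agree after pvStrip
theorem strip_foldA_eq_strip_foldIns (bs : List (String × Option String)) :
    ∀ d : PySem.Dict String (Option String), d.keys.Nodup → (bs.map Prod.fst).Nodup →
    pvStrip ((bs.foldl
        (fun base kv => match kv.2 with
          | none => base.erase kv.1
          | some v => base.insert kv.1 (some v)) d).items)
      = pvStrip ((bs.foldl (fun d kv => d.insert kv.1 kv.2) d).items) := by
  induction bs with
  | nil => intro d _ _; rfl
  | cons kv bs ih =>
    intro d hd hbs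
    obtain ⟨k, v⟩ := kv
    simp only [List.map_cons, List.nodup_cons] at hbs
    simp only [List.foldl_cons]
    cases v with
    | some s => exact ih (d.insert k (some s)) (PySem.Dict.nodup_keys_insert d k (some s) hd) hbs.2
    | none =>
      have hde : (d.erase k).keys.Nodup := by
        have hsub : (d.erase k).items.Sublist d.items := List.filter_sublist
        exact (hsub.map Prod.fst).nodup hd
      rw [ih (d.erase k) hde hbs.2]
      by_cases hc : d.contains k = true
      · -- k present in d: split d.items around its (unique) k entry
        have hmem : k ∈ d.keys := (PySem.Dict.contains_iff_mem_keys d k).mp hc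
        obtain ⟨⟨k0, v0⟩, hp, hk0⟩ := List.mem_map.mp hmem
        obtain ⟨s1, t1, hst⟩ := List.append_of_mem hp
        have hk0' : k0 = k := hk0
        subst hk0'
        have hkeys : d.items.map Prod.fst = s1.map Prod.fst ++ k0 :: t1.map Prod.fst := by
          rw [hst]; simp
        have hnd : (s1.map Prod.fst ++ k0 :: t1.map Prod.fst).Nodup := by
          rw [← hkeys]; exact hd
        have hks : k0 ∉ s1.map Prod.fst := by
          intro hmem'
          exact (List.disjoint_of_nodup_append hnd) hmem' (List.mem_cons_self ..)
        have hcons : (k0 :: t1.map Prod.fst).Nodup := (List.nodup_append.mp hnd).2.1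
        have hkt : k0 ∉ t1.map Prod.fst := (List.nodup_cons.mp hcons).1
        have hsl : ∀ p ∈ s1, ¬(p.1 == k0) = true := by
          intro p hps hpk
          exact hks (List.mem_map.mpr ⟨p, hps, by simpa using hpk⟩)
        have htl : ∀ p ∈ t1, ¬(p.1 == k0) = true := by
          intro p hpt hpk
          exact hkt (List.mem_map.mpr ⟨p, hpt, by simpa using hpk⟩)
        have herase : d.erase k0 = PySem.Dict.mk (s1 ++ t1) := by
          simp only [PySem.Dict.erase, hst, List.filter_append, List.filter_cons]
          rw [List.filter_eq_self.mpr (fun p hps => by simpa using hsl p hps),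
              List.filter_eq_self.mpr (fun p hpt => by simpa using htl p hpt)]
          simp
        have hinsert : d.insert k0 none = PySem.Dict.mk (s1 ++ (k0, none) :: t1) := by
          simp only [PySem.Dict.insert, hc, if_true, hst, List.map_append, List.map_cons]
          rw [map_replace_eq_self k0 none s1 hsl, map_replace_eq_self k0 none t1 htl]
          simp
        rw [herase, hinsert]
        exact (strip_foldl_mid bs s1 t1 k0
          (by rw [List.map_append]; intro hmem'
              rcases List.mem_append.mp hmem' with h | h
              · exact hks h
              · exact hkt h)
          hbs.1).symm
      · -- k absent from d: erase is a no-op, the insert appends a stripped entry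
        have hcf : d.contains k = false := Bool.eq_false_iff.mpr hc
        have hnk : ∀ p ∈ d.items, ¬(p.1 == k) = true := by
          intro p hps hpk
          exact hc (by simp only [PySem.Dict.contains]; exact List.any_eq_true.mpr ⟨p, hps, hpk⟩)
        have herase : d.erase k = PySem.Dict.mk d.items := by
          simp only [PySem.Dict.erase]
          rw [List.filter_eq_self.mpr (fun p hps => by simpa using hnk p hps)]
        have hinsert : d.insert k none = PySem.Dict.mk (d.items ++ (k, none) :: []) := by
          simp [PySem.Dict.insert, hcf]
        rw [herase, hinsert]
        have := (strip_foldl_mid bs d.items [] k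
          (by simp only [List.append_nil]; intro hmem'
              obtain ⟨p, hps, hpk⟩ := List.mem_map.mp hmem'
              exact hnk p hps (by simpa using hpk))
          hbs.1).symm
        simpa using this

theorem main_eq (a b : Option (List (String × Option String))) :
    merge_kv_reducer a b = merge_kv_reducer_alt a b := by
  have hA : merge_kv_reducer a b
      = pvStrip ((((PySem.Dict.ofList (b.getD [])).items).foldl
          (fun base kv => match kv.2 with
            | none => base.erase kv.1
            | some v => base.insert kv.1 (some v))
          (PySem.Dict.ofList (a.getD []))).items) := by
    cases b with
    | none => rfl
    | some bl => cases bl with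
      | nil => rfl
      | cons p t => rfl
  have hbd : ((PySem.Dict.ofList (b.getD [])).items.map Prod.fst).Nodup :=
    PySem.Dict.nodup_keys_ofList (b.getD [])
  have had : ((PySem.Dict.ofList (a.getD [])).keys).Nodup :=
    PySem.Dict.nodup_keys_ofList (a.getD [])
  rw [hA, strip_foldA_eq_strip_foldIns _ _ had hbd]
  -- B side: the filter only drops entries whose value is already None
  unfold merge_kv_reducer_alt
  rw [pvStrip_filter]
  intro kv hm hp
  have hmn : ((PySem.Dict.ofList (b.getD [])).items.foldl
      (fun d kv => d.insert kv.1 kv.2) (PySem.Dict.ofList (a.getD []))).keys.Nodup :=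
    PySem.Dict.nodup_keys_foldl_insert_key _ Prod.fst (fun _ kv => kv.2) _ had
  simp only [Bool.not_eq_false', Bool.and_eq_true, beq_iff_eq] at hp
  have hbmem : (kv.1, (none : Option String)) ∈ (PySem.Dict.ofList (b.getD [])).items :=
    PySem.Dict.mem_items_of_get?_eq_some _ hp.2
  have h1 := get?_foldl_mem ((PySem.Dict.ofList (b.getD [])).items) kv.1 none
    (PySem.Dict.ofList (a.getD [])) hbd hbmem
  have h2 := PySem.Dict.get?_of_mem_items _ hm hmn
  rw [h1] at h2
  exact (Option.some.injEq .. ▸ h2).symm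

-- ===== VERDICT (by name: the statement is the Claim_ definition above) =====
theorem merge_kv_reducer_spec : Claim_equal_merge_kv_reducer := by
  intro a b _ _
  unfold Spec_merge_kv_reducer
  exact main_eq a b
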